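-- pv_equiv track=rewrite | github.com/Fellipe-Tomasella/Faculdade | 3º Semestre/matematica discreta/modulo.py | gerar_tabela_multiplicacao_modular
-- ===== SOURCE A (Python) =====
-- def gerar_tabela_multiplicacao_modular(n):
--     """
--     Gera uma tabela de multiplicação modular para Zn.
--
--     Args:
--         n (int): O módulo
--
--     Returns:
--         list: Matriz representando a tabela
--     """
--     # Cabeçalho da tabela
--     tabela = [["⊗"] + [str(i) for i in range(n)]]
--
--     # Preenche as linhas da tabela
--     for a in range(n):
--         linha = [str(a)]  # Adiciona o primeiro elemento da linha (multiplicador)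
--         for b in range(n):
--             # Calcula a multiplicação modular
--             resultado = (a - b) % n
--             linha.append(str(resultado))
--         tabela.append(linha)
--
--     return tabela
-- ===== SOURCE B (Python) =====
-- def gerar_tabela_multiplicacao_modular(n):
--     """Circulant construction: row a is str(a) plus a rotation of a single
--     precomputed base row, taken by slicing a doubled base list."""
--     header = ["⊗"] + [str(i) for i in range(n)]
--     base = [str((-k) % n) for k in range(n)]
--     doubled = base + base
--     return [header] + [[str(a)] + doubled[n - a:2 * n - a] for a in range(n)]
-- ===== Notes on version B (the rewrite author's own statement) =====
-- stated objective: alternative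
-- what changed: Exploits that the table is circulant: one base row [str((-k)%n)] is computed once and every data row is a rotation of it obtained by slicing a doubled copy, instead of computing (a-b)%n cell by cell in nested loops.
import Mathlib
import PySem

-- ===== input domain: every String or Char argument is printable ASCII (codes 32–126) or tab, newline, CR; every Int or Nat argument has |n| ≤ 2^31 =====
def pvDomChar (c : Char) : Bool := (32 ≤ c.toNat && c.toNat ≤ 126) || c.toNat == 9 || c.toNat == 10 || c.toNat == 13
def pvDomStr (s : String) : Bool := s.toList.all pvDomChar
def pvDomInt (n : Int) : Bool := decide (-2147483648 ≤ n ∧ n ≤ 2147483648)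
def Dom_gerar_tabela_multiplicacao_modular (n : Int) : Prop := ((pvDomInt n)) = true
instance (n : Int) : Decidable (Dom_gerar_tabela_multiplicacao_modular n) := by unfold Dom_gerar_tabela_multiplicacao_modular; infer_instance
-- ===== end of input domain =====

-- B builds each data row as a rotation (slice of a doubled copy) of one precomputed base row
-- instead of computing (a-b)%n cell by cell; same return value, different construction.

-- ===== PORT A =====
def gerar_tabela_multiplicacao_modular (n : Int) : List (List String) :=
  let tabela : List (List String) :=
    [["⊗"] ++ (PySem.List.pyRange 0 n 1).map (fun i => PySem.Int.toStr i)]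
  (PySem.List.pyRange 0 n 1).foldl (fun tabela a =>
    let linha :=
      (PySem.List.pyRange 0 n 1).foldl
        (fun linha b => linha ++ [PySem.Int.toStr (PySem.Int.mod (a - b) n)])
        [PySem.Int.toStr a]
    tabela ++ [linha]) tabela

-- ===== PORT B =====
-- the single base row: base[k] = str((-k) % n)
def pvBase (n : Int) : List String :=
  (PySem.List.pyRange 0 n 1).map (fun k => PySem.Int.toStr (PySem.Int.mod (-k) n))

def gerar_tabela_multiplicacao_modular_alt (n : Int) : List (List String) :=
  let header := "⊗" :: (PySem.List.pyRange 0 n 1).map (fun i => PySem.Int.toStr i)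
  let doubled := pvBase n ++ pvBase n
  header ::
    (PySem.List.pyRange 0 n 1).map (fun a =>
      PySem.Int.toStr a :: PySem.List.slice doubled (some (n - a)) (some (2 * n - a)))

-- ===== PRECONDITION & SPEC =====
def Spec_gerar_tabela_multiplicacao_modular (n : Int) (out : List (List String)) : Prop := out = gerar_tabela_multiplicacao_modular_alt n
instance (n : Int) (out : List (List String)) : Decidable (Spec_gerar_tabela_multiplicacao_modular n out) := by unfold Spec_gerar_tabela_multiplicacao_modular; infer_instance

-- ===== CLAIM (what is proved, stated in full; the proofs are below) =====
def Claim_equal_gerar_tabela_multiplicacao_modular : Prop := ∀ (n : Int), Dom_gerar_tabela_multiplicacao_modular n → Spec_gerar_tabela_multiplicacao_modular n (gerar_tabela_multiplicacao_modular n)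

-- ===== LEMMAS AND PROOFS =====

-- the rotated slice equals A's row body
lemma pv_slice_row (n a : Int) (ha : 0 ≤ a) (han : a < n) :
    PySem.List.slice (pvBase n ++ pvBase n) (some (n - a)) (some (2 * n - a)) =
      (PySem.List.pyRange 0 n 1).map (fun b => PySem.Int.toStr (PySem.Int.mod (a - b) n)) := by
  have hn : 0 < n := lt_of_le_of_lt ha han
  obtain ⟨j, rfl⟩ : ∃ j : Nat, a = (j : Int) := ⟨a.toNat, (Int.toNat_of_nonneg ha).symm⟩
  obtain ⟨m, rfl⟩ : ∃ m : Nat, n = (m : Int) := ⟨n.toNat, (Int.toNat_of_nonneg hn.le).symm⟩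
  have hjm : j < m := by exact_mod_cast han
  have h1 : (m:Int) - j = ((m - j : Nat) : Int) := by omega
  have h2 : 2*(m:Int) - j = ((m - j : Nat) : Int) + (m : Int) := by omega
  rw [h1, h2, PySem.List.slice_natCast_add]
  unfold pvBase
  rw [PySem.List.pyRange_one]
  simp only [Int.sub_zero, Int.toNat_natCast, List.map_map, zero_add]
  apply List.ext_getElem
  · simp; omega
  · intro i hi1 hi2
    simp only [List.getElem_map, List.getElem_range, Function.comp_apply, List.getElem_take,
      List.getElem_drop, List.getElem_append, List.length_map, List.length_range]
    split_ifs with hcase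
    · -- i < j side: index m - j + i lands in the first copy
      congr 1
      rw [PySem.Int.mod_eq_emod_of_pos (by exact_mod_cast Nat.zero_lt_of_lt hjm : (0:Int) < (m:Int)),
          PySem.Int.mod_eq_emod_of_pos (by exact_mod_cast Nat.zero_lt_of_lt hjm : (0:Int) < (m:Int))]
      have hlt : i < j := by simp at hcase; omega
      have : (-(↑(m - j + i)) : Int) = ((↑j - ↑i) - ↑m : Int) := by push_cast; omega
      rw [this, Int.sub_emod_right]
    · congr 2
      have hge : j ≤ i := by simp at hcase; omega
      omega

theorem gerar_tabela_multiplicacao_modular_spec : Claim_equal_gerar_tabela_multiplicacao_modular := by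
  intro n _
  unfold Spec_gerar_tabela_multiplicacao_modular
  unfold gerar_tabela_multiplicacao_modular gerar_tabela_multiplicacao_modular_alt
  simp only [PySem.List.foldl_append_singleton_eq_map, List.cons_append, List.nil_append]
  refine congrArg _ ?_
  refine List.map_congr_left ?_
  intro a ha
  rw [PySem.List.mem_pyRange_one] at ha
  rw [pv_slice_row n a ha.1 ha.2]
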